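-- pv_equiv track=rewrite | github.com/ducdat2004/PythonBasic | R.py | qds
-- ===== SOURCE A (Python) =====
-- def qds(a, b, v):
--     count = 0
--     s = 0
--     while s != v:
--         if s + a == v:
--             s += a
--         else:
--             s += a - b
--         count += 1
--     return count
-- ===== SOURCE B (Python) =====
-- def qds(a, b, v):
--     # Closed form: A's loop adds a-b per step (except a final +a step), so the
--     # count is v//(a-b) or (v-a)//(a-b)+1, whichever event the walk hits first.
--     if v == 0:
--         return 0
--     d = a - b
--     if d == 0:
--         if a == v:
--             return 1
--         raise ValueError("sum never reaches v")
--     j1 = v // d if v % d == 0 and v // d > 0 else None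
--     j2 = (v - a) // d if (v - a) % d == 0 and (v - a) // d >= 0 else None
--     if j1 is not None and (j2 is None or j1 <= j2):
--         return j1
--     if j2 is not None:
--         return j2 + 1
--     raise ValueError("sum never reaches v")
-- ===== Notes on version B (the rewrite author's own statement) =====
-- stated objective: faster
-- what changed: Replaces the step-by-step accumulation loop by an O(1) closed-form divisibility computation of the iteration count.
import Mathlib
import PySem

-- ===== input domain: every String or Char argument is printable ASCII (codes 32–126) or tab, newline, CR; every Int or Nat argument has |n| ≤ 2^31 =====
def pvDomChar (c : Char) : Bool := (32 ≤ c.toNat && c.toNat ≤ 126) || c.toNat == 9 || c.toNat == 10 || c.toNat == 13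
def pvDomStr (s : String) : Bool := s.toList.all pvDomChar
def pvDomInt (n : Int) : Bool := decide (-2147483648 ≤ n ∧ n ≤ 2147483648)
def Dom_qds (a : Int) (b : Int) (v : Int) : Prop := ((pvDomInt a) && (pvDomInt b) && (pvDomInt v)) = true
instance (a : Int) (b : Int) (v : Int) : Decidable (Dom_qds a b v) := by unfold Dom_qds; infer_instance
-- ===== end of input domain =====

-- B replaces A's step-counting loop by an O(1) closed-form divisibility computation of the count.

-- ===== PORT A =====
-- A's while-loop, transliterated with a fuel bound large enough for every
-- terminating run (the count is at most v.natAbs or (v-a).natAbs + 1, see the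
-- lemmas below); on non-terminating inputs (outside Pre_qds) fuel runs out.
def qdsLoop (a : Int) (b : Int) (v : Int) (s : Int) (count : Int) : Nat → Int
  | 0 => count
  | fuel + 1 =>
    if s = v then count
    else if s + a = v then qdsLoop a b v (s + a) (count + 1) fuel
    else qdsLoop a b v (s + (a - b)) (count + 1) fuel

def qds (a : Int) (b : Int) (v : Int) : Int :=
  qdsLoop a b v 0 0 (v.natAbs + (v - a).natAbs + 2)

-- ===== PORT B =====
def qds_alt (a : Int) (b : Int) (v : Int) : Int :=
  if v = 0 then 0
  else
    let d := a - b
    if d = 0 then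
      (if a = v then 1 else 0)  -- Python B raises ValueError in the else case (outside Pre_qds)
    else
      let j1 : Option Int :=
        if PySem.Int.mod v d = 0 ∧ 0 < PySem.Int.floordiv v d
        then some (PySem.Int.floordiv v d) else none
      let j2 : Option Int :=
        if PySem.Int.mod (v - a) d = 0 ∧ 0 ≤ PySem.Int.floordiv (v - a) d
        then some (PySem.Int.floordiv (v - a) d) else none
      match j1, j2 with
      | some x, none => x
      | some x, some y => if x ≤ y then x else y + 1
      | none, some y => y + 1
      | none, none => 0  -- Python B raises ValueError here (outside Pre_qds)

-- ===== PRECONDITION & SPEC =====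
-- Pre_qds holds exactly when A's loop terminates: v = 0, or the single +a step
-- hits v immediately when the stride a-b is 0, or the stride divides v (resp.
-- v-a) with a nonnegative number of steps.  Outside Pre_qds A loops forever
-- (returns nothing), so nothing is excluded on which A returns.
def Pre_qds (a : Int) (b : Int) (v : Int) : Prop :=
  v = 0 ∨ (a - b = 0 ∧ a = v) ∨
  (a - b ≠ 0 ∧
    (((a - b) ∣ v ∧ 0 < v / (a - b)) ∨ ((a - b) ∣ (v - a) ∧ 0 ≤ (v - a) / (a - b))))
instance (a : Int) (b : Int) (v : Int) : Decidable (Pre_qds a b v) := by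
  unfold Pre_qds; infer_instance

def pvWitness_qds : Int × Int × Int := (5, 2, 14)

def Spec_qds (a : Int) (b : Int) (v : Int) (out : Int) : Prop := out = qds_alt a b v
instance (a : Int) (b : Int) (v : Int) (out : Int) : Decidable (Spec_qds a b v out) := by
  unfold Spec_qds; infer_instance

-- ===== CLAIM (what is proved, stated in full; the proofs are below) =====
def Claim_equal_qds : Prop :=
  ∀ (a : Int) (b : Int) (v : Int), Dom_qds a b v → Pre_qds a b v → Spec_qds a b v (qds a b v)

-- ===== LEMMAS AND PROOFS =====

-- If the loop first reaches v exactly via the while-condition after n plain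
-- steps (never hitting either exit earlier), it returns count + n.
lemma loop_exit0 (a b v : Int) (n : Nat) :
    ∀ (s c : Int) (fuel : Nat), n < fuel →
    s + n * (a - b) = v →
    (∀ j : Nat, j < n → s + j * (a - b) ≠ v ∧ s + j * (a - b) + a ≠ v) →
    qdsLoop a b v s c fuel = c + n := by
  induction n with
  | zero =>
    intro s c fuel hf hs _
    cases fuel with
    | zero => omega
    | succ fuel => simp at hs; simp [qdsLoop, hs]
  | succ n ih =>
    intro s c fuel hf hs hmin
    cases fuel with
    | zero => omega
    | succ fuel =>
      have h0 := hmin 0 (by omega)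
      simp only [Nat.cast_zero, zero_mul, add_zero] at h0
      rw [qdsLoop]
      rw [if_neg h0.1, if_neg h0.2]
      have := ih (s + (a - b)) (c + 1) fuel (by omega)
        (by push_cast at hs ⊢; linarith)
        (by
          intro j hj
          have := hmin (j + 1) (by omega)
          push_cast at this ⊢
          constructor <;> intro h <;> [apply this.1; apply this.2] <;> linarith)
      rw [this]; push_cast; ring

-- If the loop first reaches v via the s + a == v branch after n plain steps,
-- it returns count + n + 1.
lemma loop_exit1 (a b v : Int) (n : Nat) :
    ∀ (s c : Int) (fuel : Nat), n + 1 < fuel →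
    s + n * (a - b) + a = v →
    s + n * (a - b) ≠ v →
    (∀ j : Nat, j < n → s + j * (a - b) ≠ v ∧ s + j * (a - b) + a ≠ v) →
    qdsLoop a b v s c fuel = c + n + 1 := by
  induction n with
  | zero =>
    intro s c fuel hf hs hne _
    cases fuel with
    | zero => omega
    | succ fuel =>
      simp only [Nat.cast_zero, zero_mul, add_zero] at hs hne
      cases fuel with
      | zero => omega
      | succ fuel =>
        rw [qdsLoop, if_neg hne, if_pos hs, qdsLoop, if_pos hs]
        simp
  | succ n ih =>
    intro s c fuel hf hs hne hmin
    cases fuel with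
    | zero => omega
    | succ fuel =>
      have h0 := hmin 0 (by omega)
      simp only [Nat.cast_zero, zero_mul, add_zero] at h0
      rw [qdsLoop, if_neg h0.1, if_neg h0.2]
      have := ih (s + (a - b)) (c + 1) fuel (by omega)
        (by push_cast at hs ⊢; linarith)
        (by push_cast at hne ⊢; intro h; apply hne; linarith)
        (by
          intro j hj
          have := hmin (j + 1) (by omega)
          push_cast at this ⊢
          constructor <;> intro h <;> [apply this.1; apply this.2] <;> linarith)
      rw [this]; push_cast; ring

lemma floordiv_of_dvd (x d : Int) (hd : d ≠ 0) (h : d ∣ x) :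
    PySem.Int.floordiv x d = x / d := by
  obtain ⟨q, rfl⟩ := h
  have hm : PySem.Int.mod (d * q) d = 0 :=
    (PySem.Int.mod_eq_zero_iff_dvd _ _).mpr ⟨q, rfl⟩
  have hfm := PySem.Int.floordiv_mul_add_mod (d * q) d
  rw [hm, add_zero] at hfm
  have hq : (d * q) / d = q := Int.mul_ediv_cancel_left q hd
  rw [hq]
  have : PySem.Int.floordiv (d * q) d * d = q * d := by rw [hfm]; ring
  exact mul_right_cancel₀ hd this

-- From s = 0 the loop state after j plain steps is j*(a-b); if the
-- while-condition exit at q1 = v/(a-b) comes first, the loop returns q1.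
lemma answer_q1 (a b v : Int) (hdz : a - b ≠ 0)
    (hP1 : (a-b) ∣ v ∧ 0 < v / (a-b))
    (hside : ¬((a-b) ∣ (v-a) ∧ 0 ≤ (v-a) / (a-b)) ∨ v / (a-b) ≤ (v-a) / (a-b)) :
    qdsLoop a b v 0 0 (v.natAbs + (v - a).natAbs + 2) = v / (a-b) := by
  obtain ⟨hdvd, hpos⟩ := hP1
  set q := v / (a-b) with hqdef
  have hvq : q * (a-b) = v := Int.ediv_mul_cancel hdvd
  have hq : ((q.toNat : Int)) = q := Int.toNat_of_nonneg (le_of_lt hpos)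
  have habs : v.natAbs = q.natAbs * (a-b).natAbs := by
    rw [← hvq, Int.natAbs_mul]
  have habs1 : (a-b).natAbs ≠ 0 := by simpa using hdz
  have hbound : q.natAbs ≤ v.natAbs := by
    calc q.natAbs = q.natAbs * 1 := by ring
    _ ≤ q.natAbs * (a-b).natAbs := Nat.mul_le_mul_left _ (by omega)
    _ = v.natAbs := habs.symm
  have h := loop_exit0 a b v q.toNat 0 0 (v.natAbs + (v - a).natAbs + 2)
    (by omega)
    (by rw [hq]; linarith)
    (by
      intro j hj
      constructor
      · intro h
        have hje : (j : Int) = q := mul_right_cancel₀ hdz (by linarith)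
        omega
      · intro h
        have hva : v - a = (j : Int) * (a-b) := by linarith
        have hdvd2 : (a-b) ∣ (v-a) := ⟨j, by linarith [hva]⟩
        have hq2 : (v-a) / (a-b) = (j : Int) := by
          rw [hva, Int.mul_ediv_cancel _ hdz]
        rcases hside with hns | hle
        · exact hns ⟨hdvd2, by rw [hq2]; positivity⟩
        · rw [hq2] at hle; omega)
  rw [h, hq]; ring

-- If the s + a == v exit at q2 = (v-a)/(a-b) comes strictly first, the loop
-- returns q2 + 1.
lemma answer_q2 (a b v : Int) (hv : v ≠ 0) (hdz : a - b ≠ 0)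
    (hP2 : (a-b) ∣ (v-a) ∧ 0 ≤ (v-a) / (a-b))
    (hside : ¬((a-b) ∣ v ∧ 0 < v / (a-b)) ∨ (v-a) / (a-b) < v / (a-b)) :
    qdsLoop a b v 0 0 (v.natAbs + (v - a).natAbs + 2) = (v-a) / (a-b) + 1 := by
  obtain ⟨hdvd, hpos⟩ := hP2
  set q := (v-a) / (a-b) with hqdef
  have hvq : q * (a-b) = v - a := Int.ediv_mul_cancel hdvd
  have hq : ((q.toNat : Int)) = q := Int.toNat_of_nonneg hpos
  have habs : (v-a).natAbs = q.natAbs * (a-b).natAbs := by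
    rw [← hvq, Int.natAbs_mul]
  have habs1 : (a-b).natAbs ≠ 0 := by simpa using hdz
  have hbound : q.natAbs ≤ (v-a).natAbs := by
    calc q.natAbs = q.natAbs * 1 := by ring
    _ ≤ q.natAbs * (a-b).natAbs := Nat.mul_le_mul_left _ (by omega)
    _ = (v-a).natAbs := habs.symm
  have hstep : ∀ j : Int, 0 ≤ j → (j : Int) * (a-b) = v →
      ((a-b) ∣ v ∧ 0 < v / (a-b)) ∧ v / (a-b) = j := by
    intro j hj0 hjv
    have hdvdv : (a-b) ∣ v := ⟨j, by linarith⟩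
    have hqv : v / (a-b) = j := by rw [← hjv, Int.mul_ediv_cancel _ hdz]
    have hjne : j ≠ 0 := by rintro rfl; simp at hjv; omega
    exact ⟨⟨hdvdv, by rw [hqv]; omega⟩, hqv⟩
  have h := loop_exit1 a b v q.toNat 0 0 (v.natAbs + (v - a).natAbs + 2)
    (by omega)
    (by rw [hq]; linarith)
    (by
      intro h
      rw [hq] at h
      have ⟨hp1, hqv⟩ := hstep q (by omega) (by linarith)
      rcases hside with hns | hlt
      · exact hns hp1
      · rw [hqv] at hlt; omega)
    (by
      intro j hj
      constructor
      · intro h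
        have ⟨hp1, hqv⟩ := hstep (j : Int) (by positivity) (by linarith)
        rcases hside with hns | hlt
        · exact hns hp1
        · rw [hqv] at hlt; omega
      · intro h
        have hje : (j : Int) = q := mul_right_cancel₀ hdz (by linarith)
        omega)
  rw [h, hq]; ring

-- ===== VERDICT =====
theorem qds_spec : Claim_equal_qds := by
  intro a b v _hDom hPre
  unfold Spec_qds qds
  by_cases hv : v = 0
  · subst hv
    simp [qdsLoop, qds_alt]
  · rcases hPre with h0 | ⟨hdz, hav⟩ | ⟨hdz, hcase⟩
    · exact absurd h0 hv
    · -- stride 0, immediate +a exit: count 1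
      have h1 : qdsLoop a b v 0 0 (v.natAbs + (v - a).natAbs + 2) = 0 + (0:Nat) + 1 := by
        apply loop_exit1 a b v 0 0 0 _ (by omega)
        · simp; omega
        · simpa using (Ne.symm hv)
        · intro j hj; omega
      rw [h1]
      simp only [qds_alt]
      rw [if_neg hv, if_pos hdz, if_pos hav]
      norm_num
    · -- nonzero stride: translate the PySem conditions to plain ∣ and /
      have hq1 : ((a-b) ∣ v ∧ 0 < v / (a-b)) ↔
          (PySem.Int.mod v (a-b) = 0 ∧ 0 < PySem.Int.floordiv v (a-b)) := by
        constructor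
        · rintro ⟨hdvd, hpos⟩
          exact ⟨(PySem.Int.mod_eq_zero_iff_dvd _ _).mpr hdvd,
            by rw [floordiv_of_dvd _ _ hdz hdvd]; exact hpos⟩
        · rintro ⟨hm, hpos⟩
          have hdvd := (PySem.Int.mod_eq_zero_iff_dvd _ _).mp hm
          exact ⟨hdvd, by rwa [floordiv_of_dvd _ _ hdz hdvd] at hpos⟩
      have hq2 : ((a-b) ∣ (v-a) ∧ 0 ≤ (v-a) / (a-b)) ↔
          (PySem.Int.mod (v-a) (a-b) = 0 ∧ 0 ≤ PySem.Int.floordiv (v-a) (a-b)) := by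
        constructor
        · rintro ⟨hdvd, hpos⟩
          exact ⟨(PySem.Int.mod_eq_zero_iff_dvd _ _).mpr hdvd,
            by rw [floordiv_of_dvd _ _ hdz hdvd]; exact hpos⟩
        · rintro ⟨hm, hpos⟩
          have hdvd := (PySem.Int.mod_eq_zero_iff_dvd _ _).mp hm
          exact ⟨hdvd, by rwa [floordiv_of_dvd _ _ hdz hdvd] at hpos⟩
      by_cases hP1 : (a-b) ∣ v ∧ 0 < v / (a-b) <;>
        by_cases hP2 : (a-b) ∣ (v-a) ∧ 0 ≤ (v-a) / (a-b)
      · -- both exits exist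
        by_cases hle : v / (a-b) ≤ (v-a) / (a-b)
        · rw [answer_q1 a b v hdz hP1 (Or.inr hle)]
          simp only [qds_alt]
          rw [if_neg hv, if_neg hdz, if_pos (hq1.mp hP1), if_pos (hq2.mp hP2)]
          simp only [floordiv_of_dvd _ _ hdz hP1.1, floordiv_of_dvd _ _ hdz hP2.1]
          rw [if_pos hle]
        · rw [answer_q2 a b v hv hdz hP2 (Or.inr (not_le.mp hle))]
          simp only [qds_alt]
          rw [if_neg hv, if_neg hdz, if_pos (hq1.mp hP1), if_pos (hq2.mp hP2)]
          simp only [floordiv_of_dvd _ _ hdz hP1.1, floordiv_of_dvd _ _ hdz hP2.1]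
          rw [if_neg hle]
      · rw [answer_q1 a b v hdz hP1 (Or.inl hP2)]
        simp only [qds_alt]
        rw [if_neg hv, if_neg hdz, if_pos (hq1.mp hP1), if_neg (fun h => hP2 (hq2.mpr h))]
        rw [floordiv_of_dvd _ _ hdz hP1.1]
      · rw [answer_q2 a b v hv hdz hP2 (Or.inl hP1)]
        simp only [qds_alt]
        rw [if_neg hv, if_neg hdz, if_neg (fun h => hP1 (hq1.mpr h)), if_pos (hq2.mp hP2)]
        rw [floordiv_of_dvd _ _ hdz hP2.1]
      · rcases hcase with h | h
        · exact absurd h hP1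
        · exact absurd h hP2
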